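-- pv_equiv track=rewrite | github.com/intyamo/dz | lessons/lessons.py | end_of_lesson
-- ===== SOURCE A (Python) =====
-- def end_of_lesson(n: int) -> (int, int):
--     minutes = 45 * n
--     for i in range(1, n + 1):
--         if i % 2 != 0:
--             minutes += 5
--         else:
--             minutes += 15
--     if n % 2 == 0:
--         minutes -= 15
--     else:
--         minutes -= 5
--     hours1 = minutes // 60
--     hours = hours1 + 8
--     minutes -= hours1 * 60
--     return hours, minutes
-- ===== SOURCE B (Python) =====
-- def end_of_lesson(n: int) -> (int, int):
--     # Closed form: among lessons 1..n there are (n+1)//2 odd-indexed (+5 break)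
--     # and n//2 even-indexed (+15 break); the break after the last lesson is removed.
--     m = 45 * n + 5 * ((n + 1) // 2) + 15 * (n // 2) - (15 if n % 2 == 0 else 5)
--     return 8 + m // 60, m % 60
-- ===== Notes on version B (the rewrite author's own statement) =====
-- stated objective: faster
-- what changed: Replaces the O(n) break-accumulation loop with a closed-form count of odd/even lesson indices via floor division.
-- outside the precondition, e.g. on end_of_lesson(-1): A returns (7, 10), B returns (6, 55)
import Mathlib
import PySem

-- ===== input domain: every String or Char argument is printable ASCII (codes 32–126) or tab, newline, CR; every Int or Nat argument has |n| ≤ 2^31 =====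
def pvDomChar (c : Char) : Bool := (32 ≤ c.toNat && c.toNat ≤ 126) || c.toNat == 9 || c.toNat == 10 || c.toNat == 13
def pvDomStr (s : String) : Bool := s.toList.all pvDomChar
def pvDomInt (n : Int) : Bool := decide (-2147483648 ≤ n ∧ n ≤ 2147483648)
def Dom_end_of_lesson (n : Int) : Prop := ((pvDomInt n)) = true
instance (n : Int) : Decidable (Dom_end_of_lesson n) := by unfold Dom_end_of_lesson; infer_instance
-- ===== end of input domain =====

-- B replaces A's O(n) break-accumulation loop by a closed-form floor-division count
-- of odd/even lesson indices (objective: faster, asymptotic).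


-- ===== PORT A =====
def end_of_lesson (n : Int) : Int × Int :=
  let minutes := 45 * n
  let minutes := (PySem.List.pyRange 1 (n + 1) 1).foldl
      (fun m i => if PySem.Int.mod i 2 ≠ 0 then m + 5 else m + 15) minutes
  let minutes := if PySem.Int.mod n 2 = 0 then minutes - 15 else minutes - 5
  let hours1 := PySem.Int.floordiv minutes 60
  let hours := hours1 + 8
  let minutes := minutes - hours1 * 60
  (hours, minutes)

-- ===== PORT B =====
def end_of_lesson_alt (n : Int) : Int × Int :=
  let m := 45 * n + 5 * PySem.Int.floordiv (n + 1) 2 + 15 * PySem.Int.floordiv n 2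
           - (if PySem.Int.mod n 2 = 0 then 15 else 5)
  (8 + PySem.Int.floordiv m 60, PySem.Int.mod m 60)

-- ===== PRECONDITION & SPEC =====
-- Pre_ excludes negative lesson counts (outside the function's natural domain): there A's
-- empty loop still subtracts a break, an accidental value B's closed form does not reproduce.
def Pre_end_of_lesson (n : Int) : Prop := 0 ≤ n
instance (n : Int) : Decidable (Pre_end_of_lesson n) := by unfold Pre_end_of_lesson; infer_instance
def pvWitness_end_of_lesson : Int := (3)

def Spec_end_of_lesson (n : Int) (out : Int × Int) : Prop := out = end_of_lesson_alt n
instance (n : Int) (out : Int × Int) : Decidable (Spec_end_of_lesson n out) := by unfold Spec_end_of_lesson; infer_instance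

-- ===== CLAIM (what is proved, stated in full; the proofs are below) =====
def Claim_equal_end_of_lesson : Prop := ∀ (n : Int), Dom_end_of_lesson n → Pre_end_of_lesson n → Spec_end_of_lesson n (end_of_lesson n)

-- ===== LEMMAS AND PROOFS =====
lemma pv_loop (k : Nat) (s : Int) :
    (PySem.List.pyRange 1 ((k : Int) + 1) 1).foldl
      (fun m i => if PySem.Int.mod i 2 ≠ 0 then m + 5 else m + 15) s
    = s + 5 * (((k : Int) + 1) / 2) + 15 * ((k : Int) / 2) := by
  induction k generalizing s with
  | zero => simp [PySem.List.pyRange_one_eq_nil (by omega : (1:Int) + 1 ≤ 1 ∨ True)]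
  | succ k ih =>
    have hc : ((k + 1 : Nat) : Int) + 1 = ((k : Int) + 1) + 1 := by push_cast; ring
    rw [hc, PySem.List.pyRange_one_succ_right (by omega : (1:Int) ≤ (k : Int) + 1),
        List.foldl_append, ih]
    simp only [List.foldl]
    rw [PySem.Int.mod_eq_emod_of_pos (by omega : (0:Int) < 2)]
    split_ifs with h <;> omega

theorem end_of_lesson_spec : Claim_equal_end_of_lesson := by
  intro n _ hpre
  unfold Spec_end_of_lesson end_of_lesson end_of_lesson_alt
  lift n to ℕ using hpre with k
  simp only [pv_loop k]
  simp only [PySem.Int.mod_eq_emod_of_pos (by omega : (0:Int) < 2),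
      PySem.Int.floordiv_eq_ediv_of_pos (by omega : (0:Int) < 2),
      PySem.Int.mod_eq_emod_of_pos (by omega : (0:Int) < 60),
      PySem.Int.floordiv_eq_ediv_of_pos (by omega : (0:Int) < 60)]
  split_ifs with h <;> exact Prod.ext (by omega) (by omega)
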